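-- pv_equiv track=rewrite | github.com/Lee-Siyoung/Algorithm-study | 이시영/12954_pg.py | solution
-- ===== SOURCE A (Python) =====
-- def solution(x, n):
--     answer = []
--     answer.append(x)
--     a=x
--     for _ in range(n-1):
--         answer.append(x+a)
--         x+=a
--     return answer
-- ===== SOURCE B (Python) =====
-- def solution(x, n):
--     return [x * i for i in range(1, n + 1)]
-- ===== Notes on version B (the rewrite author's own statement) =====
-- stated objective: simpler
-- what changed: Each term is computed by a closed-form multiplication x*i over indices 1..n instead of threading a running sum and repeatedly appending to an accumulator list; Pre_ restricts to the problem's stated domain n >= 1, since for n <= 0 no output is specified and A's [x] and B's [] are equally defensible readings of a non-positive term count.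
-- outside the precondition, e.g. on solution(2, 0): A returns [2], B returns []; on solution(-3, -1): A returns [-3], B returns []
import Mathlib
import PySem

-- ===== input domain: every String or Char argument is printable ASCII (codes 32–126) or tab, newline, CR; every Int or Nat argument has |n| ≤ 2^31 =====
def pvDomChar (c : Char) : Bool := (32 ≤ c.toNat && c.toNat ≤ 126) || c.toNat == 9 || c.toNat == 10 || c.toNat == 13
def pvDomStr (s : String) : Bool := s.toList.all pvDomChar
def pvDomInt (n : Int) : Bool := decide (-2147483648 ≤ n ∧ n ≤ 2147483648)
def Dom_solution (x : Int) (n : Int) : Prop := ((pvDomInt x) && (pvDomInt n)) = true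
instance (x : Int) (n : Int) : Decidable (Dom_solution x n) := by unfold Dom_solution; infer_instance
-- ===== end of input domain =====

-- B computes each term by closed-form multiplication x*i over 1..n instead of A's
-- running-sum accumulator loop (objective: simpler); Pre_ restricts to the stated domain n >= 1.

-- ===== PORT A =====
def solution (x : Int) (n : Int) : List Int :=
  -- answer = [x]; a = x; for _ in range(n-1): answer.append(x+a); x += a
  let a := x
  let st := (PySem.List.pyRange 0 (n - 1) 1).foldl
    (fun (st : List Int × Int) _ => (st.1 ++ [st.2 + a], st.2 + a)) ([x], x)
  st.1

-- ===== PORT B =====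
def solution_alt (x : Int) (n : Int) : List Int :=
  (PySem.List.pyRange 1 (n + 1) 1).map (fun i => x * i)

-- ===== PRECONDITION & SPEC =====
-- Pre_ restricts to the problem's stated domain n >= 1: for n <= 0 no output is specified
-- and A's [x] and B's [] are equally defensible readings of a non-positive term count.
def Pre_solution (x : Int) (n : Int) : Prop := 1 ≤ n
instance (x : Int) (n : Int) : Decidable (Pre_solution x n) := by unfold Pre_solution; infer_instance
def pvWitness_solution : Int × Int := (2, 3)
def Spec_solution (x : Int) (n : Int) (out : List Int) : Prop := out = solution_alt x n
instance (x : Int) (n : Int) (out : List Int) : Decidable (Spec_solution x n out) := by unfold Spec_solution; infer_instance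

-- ===== CLAIM (what is proved, stated in full; the proofs are below) =====
def Claim_equal_solution : Prop := ∀ (x : Int) (n : Int), Dom_solution x n → Pre_solution x n → Spec_solution x n (solution x n)

-- ===== LEMMAS AND PROOFS =====

-- A's loop with the running total c: the accumulated list in closed form.
theorem solution_loop (a : Int) (m : Nat) (acc : List Int) (c : Int) :
    (List.range m).foldl
      (fun (st : List Int × Int) _ => (st.1 ++ [st.2 + a], st.2 + a)) (acc, c)
    = (acc ++ (List.range m).map (fun i : Nat => c + a * ((i : Int) + 1)), c + a * m) := by
  induction m generalizing acc c with
  | zero => simp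
  | succ m ih =>
    rw [List.range_succ, List.foldl_append, ih]
    simp only [List.foldl_cons, List.foldl_nil, List.map_append,
      List.map_cons, List.map_nil, List.append_assoc, Prod.mk.injEq]
    constructor
    · congr 1
      ring_nf
    · push_cast
      ring

theorem solution_spec : Claim_equal_solution := by
  intro x n _ hn0
  have hn : 1 ≤ n := hn0
  show _ = _
  simp only [solution, solution_alt]
  rw [PySem.List.pyRange_one, PySem.List.pyRange_one, List.foldl_map, List.map_map]
  rw [solution_loop]
  have hmax : (n + 1 - 1).toNat = (n - 1 - 0).toNat + 1 := by omega
  rw [hmax, List.range_succ_eq_map]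
  simp only [List.map_cons, List.map_map, List.singleton_append, Function.comp]
  refine List.cons_eq_cons.mpr ⟨by norm_num, ?_⟩
  apply List.map_congr_left
  intro i _
  simp only [Function.comp_apply]
  push_cast
  ring
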